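-- pv_equiv track=rewrite | github.com/DaemonCypher/CodingPrep | Codility/TimeComplexity/TapeEquilibrium/tapeEquilibrium.py | solution
-- ===== SOURCE A (Python) =====
-- def solution(A):
--     res = float('inf')
--     for i in range(len(A)):
--         first = sum(A[:i+1])
--         sec = sum(A[i+1:])
--
--         total = abs(first - sec)
--
--         res = min(res,total)
--
--
--     # Implement your solution here
--     return res
-- ===== SOURCE B (Python) =====
-- def solution(A):
--     total = sum(A)
--     acc = 0
--     best = None
--     for x in A:
--         acc += x
--         d = abs(2 * acc - total)
--         if best is None or d < best:
--             best = d
--     if best is None: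
--         raise ValueError("empty array")
--     return best
-- ===== Notes on version B (the rewrite author's own statement) =====
-- stated objective: faster
-- what changed: Replaced the per-index re-summation of both slices (quadratic) by one running prefix sum: each split's difference is |2*prefix - total|, tracked in a single pass.
-- outside the precondition, e.g. on solution([]): A returns inf, B raises ValueError
import Mathlib
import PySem

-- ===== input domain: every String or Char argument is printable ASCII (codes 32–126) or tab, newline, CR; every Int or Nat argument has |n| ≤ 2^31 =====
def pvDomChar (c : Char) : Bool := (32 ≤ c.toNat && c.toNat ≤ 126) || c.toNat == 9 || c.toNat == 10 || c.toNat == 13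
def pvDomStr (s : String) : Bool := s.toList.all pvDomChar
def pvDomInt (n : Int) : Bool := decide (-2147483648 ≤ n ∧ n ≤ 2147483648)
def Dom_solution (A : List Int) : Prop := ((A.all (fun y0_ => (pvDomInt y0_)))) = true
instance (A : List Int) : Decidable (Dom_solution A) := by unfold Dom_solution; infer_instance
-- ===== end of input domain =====

-- B replaces A's per-index re-summation of both slices by a single running-prefix-sum pass.

-- ===== PORT A =====
-- res = float('inf') is represented as 'none' (Option Int); A returns it only on A = [],
-- which Pre_solution excludes, so the final '.getD 0' is never the returned value on Pre_.
def solution (A : List Int) : Int :=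
  ((PySem.List.pyRange 0 (A.length : Int) 1).foldl
    (fun res i =>
      let first := (PySem.List.slice A none (some (i+1))).sum
      let sec := (PySem.List.slice A (some (i+1)) none).sum
      let total := |first - sec|
      some (match res with
            | none => total
            | some v => min v total)) none).getD 0

-- ===== PORT B =====
-- transliteration of Source B; 'best is None' at the end means A = [] (B raises ValueError there,
-- excluded by Pre_solution), rendered as '.getD 0'.
def solution_alt (A : List Int) : Int :=
  let total := A.sum
  let st := A.foldl
    (fun (p : Int × Option Int) x =>
      let acc := p.1 + x
      let d := |2 * acc - total|
      (acc, match p.2 with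
            | none => some d
            | some b => if d < b then some d else some b)) ((0 : Int), (none : Option Int))
  st.2.getD 0

-- ===== PRECONDITION & SPEC =====
-- Pre_ excludes the empty list, on which A returns float('inf') (not an int) and B raises ValueError.
def Pre_solution (A : List Int) : Prop := A ≠ []
instance (A : List Int) : Decidable (Pre_solution A) := by unfold Pre_solution; infer_instance
def pvWitness_solution : List Int := [3, 1, 2, 4, 3]

def Spec_solution (A : List Int) (out : Int) : Prop := out = solution_alt A
instance (A : List Int) (out : Int) : Decidable (Spec_solution A out) := by unfold Spec_solution; infer_instance

-- ===== CLAIM (what is proved, stated in full; the proofs are below) =====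
def Claim_equal_solution : Prop := ∀ (A : List Int), Dom_solution A → Pre_solution A → Spec_solution A (solution A)

-- ===== LEMMAS AND PROOFS =====

/-- Common reference loop: running prefix sum `acc`, best-so-far `r`. -/
def pvGo (total : Int) : List Int → Int → Option Int → Option Int
  | [], _, r => r
  | x :: xs, acc, r =>
      pvGo total xs (acc + x)
        (some (match r with
               | none => |2 * (acc + x) - total|
               | some v => min v (|2 * (acc + x) - total|)))

lemma pvB_eq_go (total : Int) : ∀ (l : List Int) (acc : Int) (r : Option Int),
    (l.foldl
      (fun (p : Int × Option Int) x =>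
        let a := p.1 + x
        let d := |2 * a - total|
        (a, match p.2 with
            | none => some d
            | some b => if d < b then some d else some b)) (acc, r)).2
    = pvGo total l acc r := by
  intro l
  induction l with
  | nil => intro acc r; simp [pvGo]
  | cons x xs ih =>
      intro acc r
      simp only [List.foldl_cons, pvGo]
      rw [ih]
      congr 1
      cases r with
      | none => rfl
      | some b =>
          simp only []
          congr 1
          by_cases h : |2 * (acc + x) - total| < b
          · simp [h, min_eq_right (le_of_lt h)]
          · simp [h, min_eq_left (le_of_not_gt h)]

lemma pvA_eq_go (A : List Int) : ∀ (m k : Nat), A.length - k = m → k ≤ A.length → ∀ (r : Option Int),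
    ((PySem.List.pyRange (k : Int) (A.length : Int) 1).foldl
      (fun res i =>
        let first := (PySem.List.slice A none (some (i+1))).sum
        let sec := (PySem.List.slice A (some (i+1)) none).sum
        let total := |first - sec|
        some (match res with
              | none => total
              | some v => min v total)) r)
    = pvGo A.sum (A.drop k) ((A.take k).sum) r := by
  intro m
  induction m with
  | zero =>
      intro k hm hk r
      have hk' : k = A.length := by omega
      subst hk'
      rw [PySem.List.pyRange_one_eq_nil (le_refl _)]
      simp [pvGo, List.drop_length]
  | succ m ih =>
      intro k hm hk r
      have hklt : k < A.length := by omega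
      rw [PySem.List.pyRange_one_cons (by exact_mod_cast hklt)]
      simp only [List.foldl_cons]
      have hk1 : ((k : Int) + 1) = ((k + 1 : Nat) : Int) := by push_cast; ring
      have hdrop : A.drop k = A[k] :: A.drop (k + 1) := List.drop_eq_getElem_cons hklt
      have htake : A.take (k + 1) = A.take k ++ [A[k]] := List.take_succ_eq_append_getElem hklt
      have hfirst : (PySem.List.slice A none (some ((k : Int) + 1))).sum = (A.take (k+1)).sum := by
        rw [hk1, PySem.List.slice_to_natCast]
      have hsec : (PySem.List.slice A (some ((k : Int) + 1)) none).sum = (A.drop (k+1)).sum := by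
        rw [hk1, PySem.List.slice_from_natCast]
      have hsum : (A.take (k+1)).sum + (A.drop (k+1)).sum = A.sum := by
        conv_rhs => rw [← List.take_append_drop (k+1) A]
        rw [List.sum_append]
      have hdiff : (A.take (k+1)).sum - (A.drop (k+1)).sum
          = 2 * ((A.take k).sum + A[k]) - A.sum := by
        have : (A.take (k+1)).sum = (A.take k).sum + A[k] := by
          rw [htake, List.sum_append]; simp
        omega
      have := ih (k + 1) (by omega) (by omega)
        (some (match r with
               | none => |(A.take (k+1)).sum - (A.drop (k+1)).sum|
               | some v => min v (|(A.take (k+1)).sum - (A.drop (k+1)).sum|)))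
      rw [← hk1] at this
      simp only [hfirst, hsec]
      rw [this, hdrop]
      simp only [pvGo]
      rw [hdiff]
      have hts : (A.take (k+1)).sum = (A.take k).sum + A[k] := by
        rw [htake, List.sum_append]; simp
      rw [hts]

-- ===== VERDICT (by name: the statement is the Claim_ definition above) =====
theorem solution_spec : Claim_equal_solution := by
  intro A _ _
  unfold Spec_solution solution solution_alt
  have hA := pvA_eq_go A A.length 0 (by omega) (by omega) none
  simp only [Int.natCast_zero, List.drop_zero, List.take_zero, List.sum_nil] at hA
  rw [hA]
  exact congrArg (fun o => Option.getD o 0) (pvB_eq_go A.sum A 0 none).symm
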